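-- pv_equiv track=rewrite | github.com/R-Vries/AdventOfCode | Python/2023/day13.py | check_rows2
-- ===== SOURCE A (Python) =====
-- def check_rows(puzzle):
--     # first find two connecting duplicate rows
--     pairs = []
--     for i, row1 in enumerate(puzzle):
--         if i + 1 < len(puzzle) and row1 == puzzle[i + 1]:
--             pairs.append((i, i + 1))
--     if len(pairs) == 0:
--         return -1
--     else:   # multiple pairs, only one option
--         for pair in pairs:
--             i = 1
--             correct = True
--             while pair[0] - i >= 0 and pair[1] + i < len(puzzle):
--                 if puzzle[pair[0] - i] != puzzle[pair[1] + i]: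
--                     correct = False
--                     break
--                 i += 1
--             if correct:
--                 return 100 * (pair[0] + 1)
--     return -1
--
-- def check_rows2(puzzle):
--     pairs = {}      # {(row1, row2): made_change}
--     for i, row in enumerate(puzzle):
--         if i + 1 < len(puzzle):
--             if row == puzzle[i + 1]:
--                 pairs.update({(i, i + 1): False})
--             elif one_difference(row, puzzle[i + 1]):
--                 pairs.update({(i, i + 1): True})
--     if len(pairs) == 0:
--         return -1
--     else:
--         result = -1
--         for pair in pairs:
--             i = 1
--             made_change = pairs[pair]
--             correct = True
--             while pair[0] - i >= 0 and pair[1] + i < len(puzzle):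
--                 r1, r2 = puzzle[pair[0] - i], puzzle[pair[1] + i]
--                 if r1 != r2:
--                     if not made_change and one_difference(r1, r2):
--                         made_change = True
--                     else:
--                         correct = False
--                         break
--                 i += 1
--             if correct:
--                 original = check_rows(puzzle)
--                 amount = 100 * (pair[0] + 1)
--                 result = amount if amount != original else result
--         return result
--
-- def one_difference(row1, row2):
--     return sum(list(x != y for x, y in zip(row1, row2))) == 1
-- ===== SOURCE B (Python) =====
-- def check_rows(puzzle):
--     # first find two connecting duplicate rows
--     pairs = []
--     for i, row1 in enumerate(puzzle):
--         if i + 1 < len(puzzle) and row1 == puzzle[i + 1]: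
--             pairs.append((i, i + 1))
--     if len(pairs) == 0:
--         return -1
--     else:   # multiple pairs, only one option
--         for pair in pairs:
--             i = 1
--             correct = True
--             while pair[0] - i >= 0 and pair[1] + i < len(puzzle):
--                 if puzzle[pair[0] - i] != puzzle[pair[1] + i]:
--                     correct = False
--                     break
--                 i += 1
--             if correct:
--                 return 100 * (pair[0] + 1)
--     return -1
--
--
-- def row_cost(r1, r2):
--     # smudges needed to make the two rows identical: 0 if already equal,
--     # 1 if exactly one character of the overlap differs, otherwise 2 (= not fixable)
--     if r1 == r2:
--         return 0
--     d = sum(x != y for x, y in zip(r1, r2))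
--     return 1 if d == 1 else 2
--
--
-- def check_rows2(puzzle):
--     n = len(puzzle)
--     original = check_rows(puzzle)
--     result = -1
--     for p in range(n - 1):
--         span = min(p + 1, n - 1 - p)
--         total = sum(row_cost(puzzle[p - i], puzzle[p + 1 + i]) for i in range(span))
--         if total <= 1 and 100 * (p + 1) != original:
--             result = 100 * (p + 1)
--     return result
-- ===== Notes on version B (the rewrite author's own statement) =====
-- stated objective: simpler
-- what changed: Replaces A's candidate-pair dict with made_change flags plus the expand-while-loop by a direct scan: for each mirror position sum a per-pair smudge cost (0 equal / 1 one-char difference / 2 unfixable) over all mirrored pairs and accept the position iff the total is at most 1.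
import Mathlib
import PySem

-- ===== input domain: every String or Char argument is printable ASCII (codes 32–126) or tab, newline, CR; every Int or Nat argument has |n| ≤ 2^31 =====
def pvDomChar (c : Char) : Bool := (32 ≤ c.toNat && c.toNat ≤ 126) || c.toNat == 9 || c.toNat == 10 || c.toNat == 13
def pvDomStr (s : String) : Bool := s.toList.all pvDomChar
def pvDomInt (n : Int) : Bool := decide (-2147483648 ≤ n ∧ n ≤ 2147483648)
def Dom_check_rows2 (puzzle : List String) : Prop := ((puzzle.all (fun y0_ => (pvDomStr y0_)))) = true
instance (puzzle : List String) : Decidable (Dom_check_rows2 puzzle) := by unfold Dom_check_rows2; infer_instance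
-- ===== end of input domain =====

-- B replaces A's candidate-pair dict + made_change expand-loop by a direct per-position
-- total-smudge-cost scan (objective: simpler); same return value, no side effects.


-- ===== PORT A =====

-- one_difference: sum(x != y for x, y in zip(row1, row2)) == 1
def oneDiff (r1 r2 : String) : Bool :=
  ((r1.toList.zip r2.toList).countP (fun xy => xy.1 != xy.2)) == 1

-- check_rows is a same-module helper A calls (and Source B keeps verbatim); ported once, used by both ports.
-- pairs list of check_rows; indexing puzzle[i+1] is guarded by i+1 < len, so pyGetD … "" is exact there
def crPairs (puzzle : List String) : List (Int × Int) :=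
  (PySem.List.enumerate puzzle).foldl (fun acc x =>
    if x.1 + 1 < PySem.List.len puzzle ∧ x.2 = PySem.List.pyGetD puzzle (x.1 + 1) "" then
      acc ++ [(x.1, x.1 + 1)]
    else acc) []

-- check_rows's while loop; both indices are in range under the guard, so pyGetD … "" is exact
def crLoop (puzzle : List String) (p i : Int) : Bool :=
  if h : 0 ≤ p - i ∧ p + 1 + i < PySem.List.len puzzle then
    if PySem.List.pyGetD puzzle (p - i) "" ≠ PySem.List.pyGetD puzzle (p + 1 + i) "" then false
    else crLoop puzzle p (i + 1)
  else true
termination_by (p + 1 - i).toNat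
decreasing_by simp [PySem.List.len] at h; omega

-- check_rows's for loop with its early return
def crFor (puzzle : List String) : List (Int × Int) → Int
  | [] => -1
  | pr :: rest => if crLoop puzzle pr.1 1 then 100 * (pr.1 + 1) else crFor puzzle rest

def check_rows_py (puzzle : List String) : Int :=
  let pairs := crPairs puzzle
  if pairs.length = 0 then -1 else crFor puzzle pairs

-- the pairs dict of check_rows2, as its (key, value) items in insertion order (keys are distinct)
def buildPairs (puzzle : List String) : List ((Int × Int) × Bool) :=
  (PySem.List.enumerate puzzle).foldl (fun acc x =>
    if x.1 + 1 < PySem.List.len puzzle then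
      if x.2 = PySem.List.pyGetD puzzle (x.1 + 1) "" then acc ++ [((x.1, x.1 + 1), false)]
      else if oneDiff x.2 (PySem.List.pyGetD puzzle (x.1 + 1) "") then acc ++ [((x.1, x.1 + 1), true)]
      else acc
    else acc) []

-- check_rows2's while loop (r1, r2 inlined); indices in range under the guard, pyGetD … "" exact
def loopA (puzzle : List String) (p i : Int) (m : Bool) : Bool :=
  if h : 0 ≤ p - i ∧ p + 1 + i < PySem.List.len puzzle then
    if PySem.List.pyGetD puzzle (p - i) "" ≠ PySem.List.pyGetD puzzle (p + 1 + i) "" then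
      if !m && oneDiff (PySem.List.pyGetD puzzle (p - i) "") (PySem.List.pyGetD puzzle (p + 1 + i) "") then
        loopA puzzle p (i + 1) true
      else false
    else loopA puzzle p (i + 1) m
  else true
termination_by (p + 1 - i).toNat
decreasing_by all_goals (simp [PySem.List.len] at h; omega)

def check_rows2 (puzzle : List String) : Int :=
  let pairs := buildPairs puzzle
  if pairs.length = 0 then -1
  else
    pairs.foldl (fun result pr =>
      if loopA puzzle pr.1.1 1 pr.2 then
        let original := check_rows_py puzzle
        let amount := 100 * (pr.1.1 + 1)
        if amount ≠ original then amount else result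
      else result) (-1)

-- ===== PORT B =====

-- smudges needed to make two rows identical: 0 equal / 1 one-char overlap difference / 2 unfixable
def rowCost (r1 r2 : String) : Int :=
  if r1 = r2 then 0
  else
    let d := (r1.toList.zip r2.toList).countP (fun xy => xy.1 != xy.2)
    if d = 1 then 1 else 2

-- B: for each mirror position p, total smudge cost over all mirrored pairs; accept iff ≤ 1.
-- All indices p - i, p + 1 + i are in range (i < span), so getD … "" is exact.
def check_rows2_alt (puzzle : List String) : Int :=
  let n := puzzle.length
  let original := check_rows_py puzzle
  (List.range (n - 1)).foldl (fun result p =>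
    let span := min (p + 1) (n - 1 - p)
    let total := ((List.range span).map
      (fun i => rowCost (puzzle.getD (p - i) "") (puzzle.getD (p + 1 + i) ""))).sum
    if total ≤ 1 ∧ 100 * ((p : Int) + 1) ≠ original then 100 * ((p : Int) + 1) else result) (-1)

-- ===== PRECONDITION & SPEC =====
def Spec_check_rows2 (puzzle : List String) (out : Int) : Prop := out = check_rows2_alt puzzle
instance (puzzle : List String) (out : Int) : Decidable (Spec_check_rows2 puzzle out) := by unfold Spec_check_rows2; infer_instance

-- ===== CLAIM (what is proved, stated in full; the proofs are below) =====
def Claim_equal_check_rows2 : Prop := ∀ (puzzle : List String), Dom_check_rows2 puzzle → Spec_check_rows2 puzzle (check_rows2 puzzle)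

-- ===== LEMMAS AND PROOFS =====

-- total smudge cost of mirror position p, summed from offset i on (proof-side recursion)
def costs (puzzle : List String) (p i : Int) : Int :=
  if h : 0 ≤ p - i ∧ p + 1 + i < PySem.List.len puzzle then
    rowCost (PySem.List.pyGetD puzzle (p - i) "") (PySem.List.pyGetD puzzle (p + 1 + i) "")
      + costs puzzle p (i + 1)
  else 0
termination_by (p + 1 - i).toNat
decreasing_by simp [PySem.List.len] at h; omega

-- the contribution of index p to the pairs dict of check_rows2, as a 0/1-element list
def candList (puzzle : List String) (p : Nat) : List ((Int × Int) × Bool) :=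
  if (p : Int) + 1 < PySem.List.len puzzle then
    if PySem.List.pyGetD puzzle (p : Int) "" = PySem.List.pyGetD puzzle ((p : Int) + 1) "" then
      [(((p : Int), (p : Int) + 1), false)]
    else if oneDiff (PySem.List.pyGetD puzzle (p : Int) "") (PySem.List.pyGetD puzzle ((p : Int) + 1) "") then
      [(((p : Int), (p : Int) + 1), true)]
    else []
  else []

theorem rowCost_nonneg (r1 r2 : String) : 0 ≤ rowCost r1 r2 := by
  simp only [rowCost]; split_ifs <;> norm_num

theorem rowCost_pos (r1 r2 : String) (hne : r1 ≠ r2) : 1 ≤ rowCost r1 r2 := by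
  simp only [rowCost]; split_ifs with h h2
  · exact absurd h hne
  · norm_num
  · norm_num

theorem rowCost_eq_zero (r1 r2 : String) (h : r1 = r2) : rowCost r1 r2 = 0 := by
  simp [rowCost, h]

theorem rowCost_eq_one (r1 r2 : String) (hne : r1 ≠ r2) (hd : oneDiff r1 r2 = true) :
    rowCost r1 r2 = 1 := by
  simp only [oneDiff, beq_iff_eq] at hd
  simp [rowCost, hne, hd]

theorem rowCost_eq_two (r1 r2 : String) (hne : r1 ≠ r2) (hd : oneDiff r1 r2 = false) :
    rowCost r1 r2 = 2 := by
  simp only [oneDiff, beq_eq_false_iff_ne, ne_eq] at hd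
  simp [rowCost, hne, hd]

theorem costs_nonneg_aux (puzzle : List String) (p : Int) :
    ∀ (k : Nat) (i : Int), (p + 1 - i).toNat = k → 0 ≤ costs puzzle p i := by
  intro k
  induction k with
  | zero =>
    intro i hk
    rw [costs.eq_def, dif_neg]
    rintro ⟨h1, _⟩; omega
  | succ k ih =>
    intro i hk
    rw [costs.eq_def]
    split
    · next h =>
      exact add_nonneg (rowCost_nonneg _ _) (ih (i + 1) (by omega))
    · exact le_refl 0

theorem costs_nonneg (puzzle : List String) (p i : Int) : 0 ≤ costs puzzle p i :=
  costs_nonneg_aux puzzle p _ i rfl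

theorem loopA_iff_aux (puzzle : List String) (p : Int) :
    ∀ (k : Nat) (i : Int) (m : Bool), (p + 1 - i).toNat = k →
      ((loopA puzzle p i m = true) ↔ costs puzzle p i ≤ (if m then 0 else 1)) := by
  intro k
  induction k with
  | zero =>
    intro i m hk
    have hg : ¬(0 ≤ p - i ∧ p + 1 + i < PySem.List.len puzzle) := by
      rintro ⟨h1, _⟩; omega
    rw [loopA.eq_def, costs.eq_def, dif_neg hg, dif_neg hg]
    cases m <;> simp
  | succ k ih =>
    intro i m hk
    by_cases hg : 0 ≤ p - i ∧ p + 1 + i < PySem.List.len puzzle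
    · rw [loopA.eq_def, costs.eq_def, dif_pos hg, dif_pos hg]
      have hk' : (p + 1 - (i + 1)).toNat = k := by omega
      by_cases hne : PySem.List.pyGetD puzzle (p - i) "" ≠ PySem.List.pyGetD puzzle (p + 1 + i) ""
      · rw [if_pos hne]
        by_cases hm : (!m && oneDiff (PySem.List.pyGetD puzzle (p - i) "") (PySem.List.pyGetD puzzle (p + 1 + i) "")) = true
        · rw [if_pos hm]
          simp only [Bool.and_eq_true, Bool.not_eq_true'] at hm
          obtain ⟨hm0, hod⟩ := hm
          rw [ih (i + 1) true hk', hm0, rowCost_eq_one _ _ hne hod,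
              show (if (true : Bool) then (0 : Int) else 1) = 0 from by simp,
              show (if (false : Bool) then (0 : Int) else 1) = 1 from by simp]
          constructor <;> intro h <;> omega
        · rw [if_neg hm]
          simp only [Bool.and_eq_true, Bool.not_eq_true'] at hm
          have hc := costs_nonneg puzzle p (i + 1)
          refine iff_of_false (by simp) ?_
          intro hcon
          cases m with
          | true =>
            have h1 := rowCost_pos _ _ hne
            norm_num at hcon
            omega
          | false =>
            have hod : oneDiff (PySem.List.pyGetD puzzle (p - i) "") (PySem.List.pyGetD puzzle (p + 1 + i) "") = false := by
              cases hox : oneDiff (PySem.List.pyGetD puzzle (p - i) "") (PySem.List.pyGetD puzzle (p + 1 + i) "") with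
              | false => rfl
              | true => exact absurd ⟨rfl, hox⟩ hm
            have h2 := rowCost_eq_two _ _ hne hod
            norm_num at hcon
            omega
      · rw [if_neg hne]
        push_neg at hne
        rw [ih (i + 1) m hk', rowCost_eq_zero _ _ hne, zero_add]
    · rw [loopA.eq_def, costs.eq_def, dif_neg hg, dif_neg hg]
      cases m <;> simp

theorem loopA_iff (puzzle : List String) (p i : Int) (m : Bool) :
    (loopA puzzle p i m = true) ↔ costs puzzle p i ≤ (if m then 0 else 1) :=
  loopA_iff_aux puzzle p _ i m rfl

theorem len_eq_cast (puzzle : List String) : PySem.List.len puzzle = (puzzle.length : Int) := by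
  simp [PySem.List.len]

theorem sum_range'_eq_costs (puzzle : List String) (p : Nat) (hp : p + 1 < puzzle.length) :
    ∀ (k j : Nat), k = min (p + 1) (puzzle.length - 1 - p) - j →
      ((List.range' j k).map
          (fun i => rowCost (puzzle.getD (p - i) "") (puzzle.getD (p + 1 + i) ""))).sum
        = costs puzzle (p : Int) (j : Int) := by
  intro k
  induction k with
  | zero =>
    intro j hj
    rw [costs.eq_def, dif_neg]
    · simp
    · rw [len_eq_cast]; rintro ⟨h1, h2⟩; omega
  | succ k ih =>
    intro j hj
    have hj1 : j ≤ p := by omega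
    have hj2 : p + 1 + j < puzzle.length := by omega
    rw [List.range'_succ, costs.eq_def, dif_pos (by rw [len_eq_cast]; omega)]
    simp only [List.map_cons, List.sum_cons]
    congr 1
    · rw [show (p : Int) - (j : Int) = ((p - j : Nat) : Int) by omega,
          show (p : Int) + 1 + (j : Int) = ((p + 1 + j : Nat) : Int) by push_cast; ring,
          PySem.List.pyGetD_natCast, PySem.List.pyGetD_natCast]
    · rw [show (j : Int) + 1 = ((j + 1 : Nat) : Int) by push_cast; ring]
      exact ih (j + 1) (by omega)

-- B's fold, with the per-position total rewritten as `costs`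
theorem alt_eq (puzzle : List String) :
    check_rows2_alt puzzle
      = (List.range (puzzle.length - 1)).foldl
          (fun (r : Int) (p : Nat) =>
            if costs puzzle (p : Int) 0 ≤ 1 ∧ 100 * ((p : Int) + 1) ≠ check_rows_py puzzle then
              100 * ((p : Int) + 1)
            else r) (-1) := by
  simp only [check_rows2_alt]
  refine PySem.List.foldl_congr_mem _ _ _ _ ?_
  intro acc p hp
  rw [List.mem_range] at hp
  have hp1 : p + 1 < puzzle.length := by omega
  have hsum := sum_range'_eq_costs puzzle p hp1 (min (p + 1) (puzzle.length - 1 - p)) 0 (by omega)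
  rw [List.range_eq_range']
  rw [show ((0 : Nat) : Int) = (0 : Int) from rfl] at hsum
  rw [hsum]

-- A's result is the fold over the pairs items, with the empty-dict branch absorbed
theorem a_eq_foldl (puzzle : List String) :
    check_rows2 puzzle
      = (buildPairs puzzle).foldl
          (fun result pr =>
            if loopA puzzle pr.1.1 1 pr.2 then
              let original := check_rows_py puzzle
              let amount := 100 * (pr.1.1 + 1)
              if amount ≠ original then amount else result
            else result) (-1) := by
  simp only [check_rows2]
  by_cases h : (buildPairs puzzle).length = 0
  · rw [if_pos h, List.eq_nil_of_length_eq_zero h]; rfl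
  · rw [if_neg h]

-- the pairs dict of check_rows2, as per-index contributions
theorem buildPairs_eq (puzzle : List String) :
    buildPairs puzzle = (List.range puzzle.length).flatMap (fun p => candList puzzle p) := by
  simp only [buildPairs]
  rw [PySem.List.enumerate_eq_map_pyRange puzzle "", List.foldl_map, len_eq_cast,
      PySem.List.pyRange_zero_natCast, List.foldl_map]
  rw [PySem.List.foldl_congr_mem (List.range puzzle.length) _
      (fun acc p => acc ++ candList puzzle p) [] ?_]
  · exact PySem.List.foldl_append_eq_flatMap _ _ _
  · intro acc p _
    simp only [candList, len_eq_cast]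
    split_ifs <;> simp

-- one step of A's fold over the pairs items equals one step of B's per-position test
theorem stepA_eq (puzzle : List String) (p : Nat) (hp : p + 1 < puzzle.length) (r : Int) :
    ((candList puzzle p).foldl
        (fun result pr =>
          if loopA puzzle pr.1.1 1 pr.2 then
            let original := check_rows_py puzzle
            let amount := 100 * (pr.1.1 + 1)
            if amount ≠ original then amount else result
          else result) r)
      = (if costs puzzle (p : Int) 0 ≤ 1 ∧ 100 * ((p : Int) + 1) ≠ check_rows_py puzzle then
          100 * ((p : Int) + 1)
        else r) := by
  have hguard : (0 ≤ (p : Int) - 0 ∧ (p : Int) + 1 + 0 < PySem.List.len puzzle) := by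
    rw [len_eq_cast]; omega
  have hcosts0 : costs puzzle (p : Int) 0
      = rowCost (PySem.List.pyGetD puzzle ((p : Int)) "") (PySem.List.pyGetD puzzle ((p : Int) + 1) "")
        + costs puzzle (p : Int) 1 := by
    rw [costs.eq_def, dif_pos hguard]
    norm_num
  simp only [candList]
  rw [if_pos (by rw [len_eq_cast]; omega)]
  by_cases h1 : PySem.List.pyGetD puzzle ((p : Int)) "" = PySem.List.pyGetD puzzle ((p : Int) + 1) ""
  · rw [if_pos h1]
    simp only [List.foldl_cons, List.foldl_nil]
    have hc : costs puzzle (p : Int) 0 = costs puzzle (p : Int) 1 := by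
      rw [hcosts0, rowCost_eq_zero _ _ h1, zero_add]
    have hL : (loopA puzzle ((p : Int)) 1 false = true) ↔ costs puzzle (p : Int) 1 ≤ 1 := by
      rw [loopA_iff]; simp
    by_cases h2 : costs puzzle (p : Int) 1 ≤ 1
    · rw [if_pos (hL.mpr h2)]
      by_cases h3 : 100 * ((p : Int) + 1) ≠ check_rows_py puzzle
      · rw [if_pos h3, if_pos ⟨by omega, h3⟩]
      · rw [if_neg h3, if_neg fun hx => h3 hx.2]
    · rw [if_neg (by simpa [hL] using h2),
          if_neg (by rintro ⟨hx1, _⟩; omega)]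
  · rw [if_neg h1]
    by_cases hod : oneDiff (PySem.List.pyGetD puzzle ((p : Int)) "") (PySem.List.pyGetD puzzle ((p : Int) + 1) "") = true
    · rw [if_pos hod]
      simp only [List.foldl_cons, List.foldl_nil]
      have hc : costs puzzle (p : Int) 0 = 1 + costs puzzle (p : Int) 1 := by
        rw [hcosts0, rowCost_eq_one _ _ h1 hod]
      have hL : (loopA puzzle ((p : Int)) 1 true = true) ↔ costs puzzle (p : Int) 1 ≤ 0 := by
        rw [loopA_iff]; simp
      by_cases h2 : costs puzzle (p : Int) 1 ≤ 0
      · rw [if_pos (hL.mpr h2)]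
        by_cases h3 : 100 * ((p : Int) + 1) ≠ check_rows_py puzzle
        · rw [if_pos h3, if_pos ⟨by omega, h3⟩]
        · rw [if_neg h3, if_neg fun hx => h3 hx.2]
      · rw [if_neg (by simpa [hL] using h2),
            if_neg (by rintro ⟨hx1, _⟩; omega)]
    · rw [if_neg hod]
      simp only [List.foldl_nil]
      have hod' : oneDiff (PySem.List.pyGetD puzzle ((p : Int)) "") (PySem.List.pyGetD puzzle ((p : Int) + 1) "") = false := by
        cases hox : oneDiff (PySem.List.pyGetD puzzle ((p : Int)) "") (PySem.List.pyGetD puzzle ((p : Int) + 1) "") with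
        | false => rfl
        | true => exact absurd hox hod
      have hc : costs puzzle (p : Int) 0 = 2 + costs puzzle (p : Int) 1 := by
        rw [hcosts0, rowCost_eq_two _ _ h1 hod']
      have hnn := costs_nonneg puzzle (p : Int) 1
      rw [if_neg (by rintro ⟨hx1, _⟩; omega)]

-- ===== VERDICT (by name: the statement is the Claim_ definition above) =====
theorem check_rows2_spec : Claim_equal_check_rows2 := by
  intro puzzle _hd
  unfold Spec_check_rows2
  rw [alt_eq, a_eq_foldl, buildPairs_eq, List.foldl_flatMap]
  rcases Nat.eq_zero_or_pos puzzle.length with h0 | h0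
  · rw [h0]; rfl
  · have hsplit : List.range puzzle.length
        = List.range (puzzle.length - 1) ++ [puzzle.length - 1] := by
      conv_lhs => rw [show puzzle.length = (puzzle.length - 1) + 1 from by omega]
      rw [List.range_succ]
    rw [hsplit, List.foldl_append]
    have hlast : candList puzzle (puzzle.length - 1) = [] := by
      simp only [candList]
      rw [if_neg]
      rw [len_eq_cast]; omega
    simp only [List.foldl_cons, List.foldl_nil, hlast]
    refine PySem.List.foldl_congr_mem _ _ _ _ ?_
    intro r p hp
    rw [List.mem_range] at hp
    exact stepA_eq puzzle p (by omega) r
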